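-- pv_equiv track=rewrite | github.com/encord-team/encord-client-python | encord/common/bitmask_operations/bitmask_operations.py | sparse_indices_to_rle_counts
-- ===== SOURCE A (Python) =====
-- from typing import List, Sequence, Set, Tuple
--
-- def sparse_indices_to_rle_counts(indices: List[int]) -> List[int]:
--     """Convert a list of indices to RLE counts.
--
--     Args:
--         indices: List of indices representing "present" positions
--
--     Returns:
--         List of RLE counts alternating between empty and present runs
--     """
--     if len(indices) == 0:
--         return []
--
--     # For robustness, ensure the indices are sorted. The logic depends on this.
--     sorted_indices = sorted(indices)
--
--     run_lengths: List[int] = []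
--
--     last_processed_index = -1  # Tracks the last index from the previous run.
--     i = 0  # The current position in the sorted_indices array.
--
--     while i < len(sorted_indices):
--         current_present_index = sorted_indices[i]
--
--         # 1. Calculate the length of the "empty" run.
--         # This is the gap between the last present pixel and the current one.
--         empty_run_length = current_present_index - last_processed_index - 1
--         run_lengths.append(empty_run_length)
--
--         # 2. Calculate the length of the "present" run.
--         present_run_start = i
--         # Iterate through the indices to find how many are consecutive.
--         while i < len(sorted_indices) - 1 and sorted_indices[i + 1] == sorted_indices[i] + 1:
--             i += 1
--         present_run_end = i
--         present_run_length = present_run_end - present_run_start + 1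
--         run_lengths.append(present_run_length)
--
--         # Update the last processed index to the end of the current present run.
--         last_processed_index = sorted_indices[present_run_end]
--         i += 1
--
--     return run_lengths
-- ===== SOURCE B (Python) =====
-- def sparse_indices_to_rle_counts(indices):
--     s = sorted(indices)
--     n = len(s)
--     if n == 0:
--         return []
--     # Stage 1: positions where a new run starts (s[i] does not extend s[i-1]).
--     cuts = [0] + [i for i in range(1, n) if s[i] != s[i - 1] + 1] + [n]
--     # Stage 2: each adjacent boundary pair (a, b) is one run s[a:b];
--     # the empty run before it is the gap from the previous run's end.
--     out = []
--     for a, b in zip(cuts, cuts[1:]):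
--         prev_end = s[a - 1] if a > 0 else -1
--         out.append(s[a] - prev_end - 1)
--         out.append(b - a)
--     return out
-- ===== Notes on version B (the rewrite author's own statement) =====
-- stated objective: alternative
-- what changed: Instead of A's stateful nested scan (outer while with an inner while consuming each consecutive run), B works in two stages: a comprehension first computes the list of run-boundary positions (indices where s[i] != s[i-1]+1), then the output is produced purely arithmetically from adjacent boundary pairs (gap = segment start minus previous segment end, length = boundary difference) with no running state.
import Mathlib
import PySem

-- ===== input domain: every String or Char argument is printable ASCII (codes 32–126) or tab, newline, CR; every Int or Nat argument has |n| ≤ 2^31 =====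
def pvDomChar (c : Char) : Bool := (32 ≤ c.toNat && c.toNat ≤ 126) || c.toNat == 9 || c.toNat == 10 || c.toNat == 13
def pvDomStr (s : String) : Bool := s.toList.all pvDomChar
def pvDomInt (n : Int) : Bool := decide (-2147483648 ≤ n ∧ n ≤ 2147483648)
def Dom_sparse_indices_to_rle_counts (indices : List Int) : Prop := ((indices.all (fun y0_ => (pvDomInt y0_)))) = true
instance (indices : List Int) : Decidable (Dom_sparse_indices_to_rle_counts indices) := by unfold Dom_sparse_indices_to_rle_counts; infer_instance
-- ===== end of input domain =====

-- B replaces A's stateful nested while-loops by two stages: a comprehension computing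
-- the run-boundary positions, then pure arithmetic over adjacent boundary pairs; objective: alternative.

-- ===== PORT A =====
-- inner while-loop of A: starting a present run at `cur`, consume consecutive
-- successors from the remaining sorted list; returns (run end value, rest, run length)
def pvTakeRunA : Int → List Int → Int × List Int × Int
  | cur, [] => (cur, [], 1)
  | cur, next :: rest =>
      if next = cur + 1 then
        let (e, r, c) := pvTakeRunA next rest
        (e, r, c + 1)
      else
        (cur, next :: rest, 1)

-- outer while-loop of A: `last` is last_processed_index, the list the unprocessed
-- suffix; fuel bounds the number of outer iterations (each consumes ≥ 1 element,
-- so fuel = length of the sorted list suffices) and only makes the recursion structural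
def pvOuterA : Nat → Int → List Int → List Int
  | 0, _, _ => []
  | _ + 1, _, [] => []
  | fuel + 1, last, cur :: rest =>
      let empty := cur - last - 1
      match pvTakeRunA cur rest with
      | (e, r, c) => empty :: c :: pvOuterA fuel e r

def sparse_indices_to_rle_counts (indices : List Int) : List Int :=
  if indices.length = 0 then []
  else
    let sorted_indices := PySem.List.sorted indices (fun x => x) false
    pvOuterA sorted_indices.length (-1) sorted_indices

-- ===== PORT B =====
-- Source B stage 1: `[i for i in range(1, n) if s[i] != s[i-1] + 1]`; the indices i are
-- the integers 1..n-1, always in range, so range(1,n) is ported as List.range' 1 (n-1)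
-- over Nat and s[i] as getD (the default is never consulted) — exact on every input.
def pvCutsB (s : List Int) : List Nat :=
  (List.range' 1 (s.length - 1)).filter (fun i => !(s.getD i 0 == s.getD (i - 1) 0 + 1))

-- Source B loop body for one boundary pair (a, b): the gap entry and the length entry
def pvEmitB (s : List Int) (ab : Nat × Nat) : List Int :=
  [s.getD ab.1 0 - (if 0 < ab.1 then s.getD (ab.1 - 1) 0 else -1) - 1,
   (ab.2 : Int) - (ab.1 : Int)]

def sparse_indices_to_rle_counts_alt (indices : List Int) : List Int :=
  let s := PySem.List.sorted indices (fun x => x) false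
  let n := s.length
  if n = 0 then []
  else
    let cuts : List Nat := 0 :: (pvCutsB s ++ [n])
    (cuts.zip cuts.tail).foldl (fun out ab => out ++ pvEmitB s ab) []

-- ===== PRECONDITION & SPEC =====
def Spec_sparse_indices_to_rle_counts (indices : List Int) (out : List Int) : Prop := out = sparse_indices_to_rle_counts_alt indices
instance (indices : List Int) (out : List Int) : Decidable (Spec_sparse_indices_to_rle_counts indices out) := by unfold Spec_sparse_indices_to_rle_counts; infer_instance

-- ===== CLAIM (what is proved, stated in full; the proofs are below) =====
def Claim_equal_sparse_indices_to_rle_counts : Prop := ∀ (indices : List Int), Dom_sparse_indices_to_rle_counts indices → Spec_sparse_indices_to_rle_counts indices (sparse_indices_to_rle_counts indices)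

-- ===== LEMMAS AND PROOFS =====

-- pvEmitB with the previous run's end generalized from -1 to `last` (proof device)
def pvEmitG (s : List Int) (last : Int) (ab : Nat × Nat) : List Int :=
  [s.getD ab.1 0 - (if 0 < ab.1 then s.getD (ab.1 - 1) 0 else last) - 1,
   (ab.2 : Int) - (ab.1 : Int)]

-- B's whole computation, with the flatMap normal form and the generalized `last`
def pvB (s : List Int) (last : Int) : List Int :=
  let cuts : List Nat := 0 :: (pvCutsB s ++ [s.length])
  (cuts.zip cuts.tail).flatMap (pvEmitG s last)

theorem pvGetD_drop (s : List Int) (k j : Nat) : (s.drop k).getD j 0 = s.getD (k + j) 0 := by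
  simp [List.getD_eq_getElem?_getD, List.getElem?_drop]

theorem pvTakeRunA_rest_le (cur : Int) (t : List Int) :
    (pvTakeRunA cur t).2.1.length ≤ t.length := by
  induction t generalizing cur with
  | nil => simp [pvTakeRunA]
  | cons x t ih =>
      simp only [pvTakeRunA]
      split
      · exact le_trans (ih x) (by simp)
      · simp

theorem pvOuterA_nil (f : Nat) (l : Int) : pvOuterA f l [] = [] := by
  cases f <;> rfl

theorem pvOuterA_cons (f : Nat) (l c : Int) (rest : List Int) :
    pvOuterA (f + 1) l (c :: rest) =
    (c - l - 1) :: (pvTakeRunA c rest).2.2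
      :: pvOuterA f (pvTakeRunA c rest).1 (pvTakeRunA c rest).2.1 := by
  simp only [pvOuterA]

theorem pvOuterA_fuel (f : Nat) : ∀ (g : Nat) (l : Int) (s : List Int),
    s.length ≤ f → s.length ≤ g → pvOuterA f l s = pvOuterA g l s := by
  induction f with
  | zero =>
      intro g l s h1 _
      have : s = [] := List.eq_nil_of_length_eq_zero (Nat.le_zero.mp h1)
      subst this
      rw [pvOuterA_nil, pvOuterA_nil]
  | succ f ih =>
      intro g l s h1 h2
      cases s with
      | nil => rw [pvOuterA_nil, pvOuterA_nil]
      | cons c rest =>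
          obtain ⟨g', rfl⟩ : ∃ g', g = g' + 1 := ⟨g - 1, by simp at h2; omega⟩
          rw [pvOuterA_cons, pvOuterA_cons]
          have hr := pvTakeRunA_rest_le c rest
          have h1' : rest.length ≤ f := by simp at h1; omega
          have h2' : rest.length ≤ g' := by simp at h2; omega
          exact congrArg (fun X => _ :: _ :: X) (ih g' _ _ (le_trans hr h1') (le_trans hr h2'))

-- Characterization of the inner while-loop: its result is (cur + k - 1, drop (k-1) of
-- the rest, k) for a run length k, the first k values form a chain, and the next value
-- (if any) breaks the chain.
theorem takeRun_spec (t : List Int) (cur : Int) :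
    ∃ k : Nat, 1 ≤ k ∧ k ≤ t.length + 1 ∧
      pvTakeRunA cur t = (cur + (k : Int) - 1, t.drop (k - 1), (k : Int)) ∧
      (∀ j : Nat, j + 1 < k → t.getD j 0 = cur + 1 + (j : Int)) ∧
      (k - 1 < t.length → t.getD (k - 1) 0 ≠ cur + (k : Int)) := by
  induction t generalizing cur with
  | nil =>
      refine ⟨1, le_refl _, by simp, ?_, ?_, ?_⟩
      · simp [pvTakeRunA]
      · intro j hj; omega
      · intro h; simp at h
  | cons x t ih =>
      by_cases hx : x = cur + 1
      · obtain ⟨k, hk1, hkle, heq, hchain, hbrk⟩ := ih x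
        refine ⟨k + 1, by omega, by simp; omega, ?_, ?_, ?_⟩
        · simp only [pvTakeRunA, if_pos hx, heq]
          subst hx
          rw [show k + 1 - 1 = (k - 1) + 1 from by omega, List.drop_succ_cons]
          simp only [Prod.mk.injEq]
          refine ⟨by push_cast; ring, trivial, by push_cast; ring⟩
        · intro j hj
          cases j with
          | zero => simpa using hx
          | succ j' =>
              have := hchain j' (by omega)
              simp only [List.getD_cons_succ, this, hx]
              push_cast; ring
        · intro hlt
          have : k + 1 - 1 = (k - 1) + 1 := by omega
          rw [this, List.getD_cons_succ]
          have hlt' : k - 1 < t.length := by simp at hlt; omega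
          have := hbrk hlt'
          intro hc
          apply this
          rw [hc, hx]
          push_cast; ring
      · refine ⟨1, le_refl _, by simp, ?_, ?_, ?_⟩
        · simp [pvTakeRunA, if_neg hx]
        · intro j hj; omega
        · intro _; simpa using hx

-- Cuts of s = h :: t decompose as the first run length k followed by the shifted cuts
-- of the remaining suffix.
theorem cuts_decomp (h : Int) (t : List Int) (k : Nat)
    (hk1 : 1 ≤ k) (hkle : k ≤ t.length + 1)
    (hchain : ∀ i : Nat, i < k → (h :: t).getD i 0 = h + (i : Int))
    (hbrk : k - 1 < t.length → t.getD (k - 1) 0 ≠ h + (k : Int)) :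
    pvCutsB (h :: t) =
      if k = t.length + 1 then []
      else k :: (pvCutsB ((h :: t).drop k)).map (· + k) := by
  have hn : (h :: t).length = t.length + 1 := by simp
  unfold pvCutsB
  have hsplit : List.range' 1 (t.length + 1 - 1) =
      List.range' 1 (k - 1) ++ List.range' k (t.length + 1 - k) := by
    have hra : List.range' 1 (k - 1) ++ List.range' (1 + 1 * (k - 1)) (t.length + 1 - k) 1
        = List.range' 1 ((k - 1) + (t.length + 1 - k)) := List.range'_append
    rw [show (1 + 1 * (k - 1)) = k from by omega] at hra
    rw [show (k - 1) + (t.length + 1 - k) = t.length + 1 - 1 from by omega] at hra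
    exact hra.symm
  rw [hn, hsplit, List.filter_append]
  have hfirst : (List.range' 1 (k - 1)).filter
      (fun i => !((h :: t).getD i 0 == (h :: t).getD (i - 1) 0 + 1)) = [] := by
    rw [List.filter_eq_nil_iff]
    intro i hi
    rw [List.mem_range'_1] at hi
    have h1 : (h :: t).getD i 0 = h + (i : Int) := hchain i (by omega)
    have h2 : (h :: t).getD (i - 1) 0 = h + ((i - 1 : Nat) : Int) := hchain (i - 1) (by omega)
    simp only [h1, h2, Bool.not_eq_true', beq_eq_false_iff_ne, ne_eq, not_not]
    have : ((i - 1 : Nat) : Int) = (i : Int) - 1 := by omega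
    rw [this]; ring
  rw [hfirst, List.nil_append]
  by_cases hk : k = t.length + 1
  · simp [hk]
  · rw [if_neg hk]
    have hrange : List.range' k (t.length + 1 - k) =
        k :: List.range' (k + 1) (t.length - k) := by
      rw [show t.length + 1 - k = (t.length - k) + 1 from by omega]
      rw [List.range'_succ]
    rw [hrange]
    have hk_cut : (!((h :: t).getD k 0 == (h :: t).getD (k - 1) 0 + 1)) = true := by
      have hgk : (h :: t).getD k 0 = t.getD (k - 1) 0 := by
        obtain ⟨k', hke⟩ : ∃ k', k = k' + 1 := ⟨k - 1, by omega⟩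
        subst hke; simp
      have hgk1 : (h :: t).getD (k - 1) 0 = h + ((k - 1 : Nat) : Int) := hchain (k - 1) (by omega)
      have hb := hbrk (by omega)
      rw [hgk, hgk1, Bool.not_eq_true', beq_eq_false_iff_ne]
      intro hc
      apply hb
      rw [hc]
      have : ((k - 1 : Nat) : Int) = (k : Int) - 1 := by omega
      rw [this]; ring
    rw [List.filter_cons_of_pos
      (p := fun i => !((h :: t).getD i 0 == (h :: t).getD (i - 1) 0 + 1)) hk_cut]
    congr 1
    have hmap : List.range' (k + 1) (t.length - k) =
        (List.range' 1 (t.length - k)).map (· + k) := by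
      have h1 : ((· + k) : Nat → Nat) = (fun x => k + x) := funext fun x => Nat.add_comm x k
      rw [h1, List.map_add_range']
    have hrlen1 : ((h :: t).drop k).length - 1 = t.length - k := by
      simp only [List.length_drop, List.length_cons]
      omega
    rw [hmap, List.filter_map, hrlen1]
    congr 1
    apply List.filter_congr
    intro j hj
    rw [List.mem_range'_1] at hj
    have e1 : (h :: t).getD (j + k) 0 = ((h :: t).drop k).getD j 0 := by
      rw [pvGetD_drop, Nat.add_comm]
    have e2 : (h :: t).getD (j + k - 1) 0 = ((h :: t).drop k).getD (j - 1) 0 := by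
      rw [pvGetD_drop, show k + (j - 1) = j + k - 1 from by omega]
    simp only [Function.comp_apply, e1, e2]

-- shifted boundary pairs emit the same two entries over the suffix
theorem emit_shift (h : Int) (t : List Int) (k : Nat) (last : Int)
    (hk1 : 1 ≤ k)
    (hchain : ∀ i : Nat, i < k → (h :: t).getD i 0 = h + (i : Int)) :
    ∀ a b : Nat, pvEmitG (h :: t) last (a + k, b + k)
      = pvEmitG ((h :: t).drop k) (h + (k : Int) - 1) (a, b) := by
  intro a b
  show [(h :: t).getD (a + k) 0 -
          (if 0 < a + k then (h :: t).getD (a + k - 1) 0 else last) - 1,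
        ((b + k : Nat) : Int) - ((a + k : Nat) : Int)]
      = [((h :: t).drop k).getD a 0 -
          (if 0 < a then ((h :: t).drop k).getD (a - 1) 0 else h + (k : Int) - 1) - 1,
        (b : Int) - (a : Int)]
  have e0 : (h :: t).getD (a + k) 0 = ((h :: t).drop k).getD a 0 := by
    rw [pvGetD_drop, Nat.add_comm]
  rw [e0, if_pos (show 0 < a + k from by omega)]
  by_cases ha : 0 < a
  · have e1 : (h :: t).getD (a + k - 1) 0 = ((h :: t).drop k).getD (a - 1) 0 := by
      rw [pvGetD_drop, show k + (a - 1) = a + k - 1 from by omega]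
    have hy : ((b + k : Nat) : Int) - ((a + k : Nat) : Int) = (b : Int) - (a : Int) := by
      push_cast; ring
    rw [if_pos ha, e1, hy]
  · have ha0 : a = 0 := by omega
    subst ha0
    rw [if_neg (by omega)]
    have e1 : (h :: t).getD (0 + k - 1) 0 = h + (k : Int) - 1 := by
      rw [show 0 + k - 1 = k - 1 from by omega, hchain (k - 1) (by omega)]
      have : ((k - 1 : Nat) : Int) = (k : Int) - 1 := by omega
      rw [this]; ring
    have hy : ((b + k : Nat) : Int) - ((0 + k : Nat) : Int) = (b : Int) - ((0 : Nat) : Int) := by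
      push_cast; ring
    rw [e1, hy]

-- main invariant: B's staged computation equals A's nested loops, for any previous-end value
theorem pvB_eq_outer (N : Nat) : ∀ (s : List Int), s.length ≤ N → s ≠ [] →
    ∀ last : Int, pvB s last = pvOuterA s.length last s := by
  induction N with
  | zero => intro s hs hne; exact absurd (List.eq_nil_of_length_eq_zero (Nat.le_zero.mp hs)) hne
  | succ N ih =>
      intro s hs hne last
      obtain ⟨h, t, rfl⟩ := List.exists_cons_of_ne_nil hne
      obtain ⟨k, hk1, hkle, heq, hchain, hbrk⟩ := takeRun_spec t h
      have hchain' : ∀ i : Nat, i < k → (h :: t).getD i 0 = h + (i : Int) := by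
        intro i hi
        cases i with
        | zero => simp
        | succ j =>
            rw [List.getD_cons_succ, hchain j (by omega)]
            push_cast; ring
      have hcuts := cuts_decomp h t k hk1 hkle hchain' hbrk
      have hlen : (h :: t).length = t.length + 1 := by simp
      rw [hlen, pvOuterA_cons, heq]
      simp only []
      by_cases hk : k = t.length + 1
      · -- single run covering everything
        have hrnil : t.drop (k - 1) = [] := by
          apply List.eq_nil_of_length_eq_zero
          simp [hk]
        rw [hrnil, pvOuterA_nil]
        unfold pvB
        rw [hcuts, if_pos hk]
        simp only [List.nil_append]
        show ([(0, (h :: t).length)].flatMap (pvEmitG (h :: t) last)) = _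
        simp only [List.flatMap_cons, List.flatMap_nil, List.append_nil]
        unfold pvEmitG
        simp only [if_neg (by omega : ¬ 0 < 0)]
        rw [hlen, hk]
        simp
      · -- first run, then recurse on the suffix r
        have hklt : k < t.length + 1 := by omega
        set r : List Int := (h :: t).drop k with hr
        have hrt : t.drop (k - 1) = r := by
          obtain ⟨k', hke⟩ : ∃ k', k = k' + 1 := ⟨k - 1, by omega⟩
          subst hke
          simp [hr]
        have hrlen : r.length = t.length + 1 - k := by simp [hr]
        have hrne : r ≠ [] := by
          intro hcon
          rw [hcon] at hrlen
          simp at hrlen; omega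
        rw [hrt]
        unfold pvB
        rw [hcuts, if_neg hk]
        -- cuts (h::t) = 0 :: (cuts r).map (· + k)
        have hmapc : (k : Nat) :: ((pvCutsB r).map (· + k) ++ [(h :: t).length])
            = ((0 : Nat) :: (pvCutsB r ++ [r.length])).map (· + k) := by
          simp only [List.map_cons, List.map_append, List.map_cons, List.map_nil]
          rw [hlen, hrlen]
          congr 2
          · omega
          · simp; omega
        simp only [List.cons_append] at hmapc ⊢
        rw [hmapc]
        -- zip of 0 :: map f L with map f L
        set L : List Nat := (0 : Nat) :: (pvCutsB r ++ [r.length]) with hL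
        have hLne : L ≠ [] := by simp [hL]
        obtain ⟨l0, L', hLeq⟩ := List.exists_cons_of_ne_nil hLne
        have hl0 : l0 = 0 := by
          rw [hLeq] at hL
          injection hL with h1 _
        have hzip : (((0 : Nat) :: L.map (· + k)).zip ((0 : Nat) :: L.map (· + k)).tail)
            = (0, l0 + k) :: ((L.zip L.tail).map (Prod.map (· + k) (· + k))) := by
          rw [hLeq]
          simp only [List.map_cons, List.zip_cons_cons, List.tail_cons]
          congr 1
          have hml : (l0 + k) :: List.map (· + k) L' = List.map (· + k) (l0 :: L') := by
            simp
          rw [hml, List.zip_map]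
        rw [hzip, List.flatMap_cons]
        have hhead : pvEmitG (h :: t) last (0, l0 + k) = [h - last - 1, (k : Int)] := by
          unfold pvEmitG
          rw [hl0]
          simp
        have hihlen : r.length ≤ N := by
          rw [hrlen]; simp at hs; omega
        have htail : List.flatMap (pvEmitG (h :: t) last)
              ((L.zip L.tail).map (Prod.map (· + k) (· + k)))
            = pvOuterA t.length (h + (k : Int) - 1) r := by
          rw [List.flatMap_map]
          rw [List.flatMap_congr
            (fun ab _ => emit_shift h t k last hk1 hchain' ab.1 ab.2)]
          have hBr := ih r hihlen hrne (h + (k : Int) - 1)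
          simp only [pvB] at hBr
          rw [hL, hBr]
          exact pvOuterA_fuel r.length t.length _ r (le_refl _) (by omega)
        rw [hhead, htail]
        rfl

-- ===== VERDICT (by name: the statement is the Claim_ definition above) =====
theorem sparse_indices_to_rle_counts_spec : Claim_equal_sparse_indices_to_rle_counts := by
  intro indices _
  unfold Spec_sparse_indices_to_rle_counts
  unfold sparse_indices_to_rle_counts sparse_indices_to_rle_counts_alt
  have hlen : indices.length = (PySem.List.sorted indices (fun x => x) false).length :=
    (PySem.List.length_sorted ..).symm
  rcases hs : PySem.List.sorted indices (fun x => x) false with _ | ⟨h, t⟩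
  · simp_all
  · have hne : indices.length ≠ 0 := by rw [hlen, hs]; simp
    have hne' : (h :: t).length ≠ 0 := by simp
    simp only [if_neg hne, if_neg hne']
    rw [PySem.List.foldl_append_eq_flatMap]
    have hEmit : pvEmitB (h :: t) = pvEmitG (h :: t) (-1) := by
      funext ab; rfl
    rw [hEmit, List.nil_append]
    exact (pvB_eq_outer (h :: t).length (h :: t) (le_refl _) (by simp) (-1)).symm
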